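-- pv_equiv track=rewrite | github.com/XiaoLingYYY/homework-Espresso-Logic-Minimizer | espresso_main/espresso_core.py | cube_intersection
-- ===== SOURCE A (Python) =====
-- def cube_intersection(c1, c2):
--     """
--         :return cube: 两个立方体的交集。如果无交集则返回 None
--     """
--     result = []
--     for i in range(0, len(c1), 2):
--         p1, p2 = c1[i:i + 2], c2[i:i + 2]
--         # '01'&'10' -> '00' (空)，'01'&'01' -> '01'，'11'&'01' -> '01'
--         intersect = "".join([str(int(b1) & int(b2)) for b1, b2 in zip(p1, p2)])
--         if intersect == '00': return None
--         result.append(intersect)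
--     return "".join(result)
-- ===== SOURCE B (Python) =====
-- def cube_intersection(c1, c2):
--     # big-integer reformulation: parse the overlapping prefixes as base-2 numbers,
--     # AND them in one machine operation, detect an annihilated 2-bit field with
--     # shift/mask tests, and format the surviving number back as a padded bitstring
--     m = min(len(c1), len(c2))
--     if m == 0:
--         return ""
--     r = int(c1[:m], 2) & int(c2[:m], 2)
--     for i in range(0, m - 1, 2):
--         if (r >> (m - 2 - i)) & 3 == 0:
--             return None
--     return format(r, "b").zfill(m)
-- ===== Notes on version B (the rewrite author's own statement) =====
-- stated objective: alternative
-- what changed: B reformulates the cube intersection as big-integer arithmetic: it parses the two overlapping prefixes as base-2 integers, takes their bitwise AND in one operation, detects an annihilated 2-bit field with shift/mask tests on that integer, and formats the result back with format(r,'b').zfill(m), instead of A's per-chunk loop that slices 2-char fields, ANDs them character by character and compares against '00'.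
-- outside the precondition, e.g. on cube_intersection('7', '5'): A returns '5', B raises ValueError; on cube_intersection('00x', '00y'): A returns None, B raises ValueError
import Mathlib
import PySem

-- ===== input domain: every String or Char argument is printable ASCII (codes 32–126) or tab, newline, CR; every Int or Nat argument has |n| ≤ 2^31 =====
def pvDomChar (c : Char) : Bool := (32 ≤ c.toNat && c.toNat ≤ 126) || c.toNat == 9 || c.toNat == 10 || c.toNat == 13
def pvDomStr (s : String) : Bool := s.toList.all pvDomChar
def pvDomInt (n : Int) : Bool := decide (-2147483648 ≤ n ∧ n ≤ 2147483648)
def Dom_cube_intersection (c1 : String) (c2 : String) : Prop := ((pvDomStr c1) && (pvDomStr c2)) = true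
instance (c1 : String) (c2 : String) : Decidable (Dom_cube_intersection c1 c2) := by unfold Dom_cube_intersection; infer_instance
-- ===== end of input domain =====

-- B replaces A's per-chunk string loop by big-integer arithmetic: it parses the overlapping
-- prefixes as base-2 numbers, ANDs them in one operation, detects an annihilated 2-bit field by
-- shift/mask tests and formats the result back zero-padded (alternative algorithm; same asymptotics).


-- ===== PORT A =====
-- "".join([str(int(b1) & int(b2)) for b1, b2 in zip(p1, p2)]); none = ValueError from int()
def pvInterChunk (p1 p2 : List Char) : Option (List Char) :=
  ((p1.zip p2).mapM (fun bp : Char × Char => do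
      let v1 ← PySem.Int.ofChars? [bp.1]
      let v2 ← PySem.Int.ofChars? [bp.2]
      pure (PySem.Int.toChars (PySem.Int.band v1 v2)))).map List.flatten

-- the 'for i in range(0, len(c1), 2)' loop; result is kept as the flat concatenation of the appended chunks
def pvLoopA (l1 l2 : List Char) (idxs : List Int) (result : List Char) : Option String :=
  match idxs with
  | [] => some (String.ofList result)                 -- return "".join(result)
  | i :: rest =>
    match pvInterChunk (PySem.List.slice l1 (some i) (some (i+2)))
                       (PySem.List.slice l2 (some i) (some (i+2))) with
    | none => none                                    -- int() raised ValueError: outside Pre_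
    | some inter =>
      if inter = ['0','0'] then none                  -- if intersect == '00': return None
      else pvLoopA l1 l2 rest (result ++ inter)       -- result.append(intersect)

def cube_intersection (c1 : String) (c2 : String) : Option String :=
  pvLoopA c1.toList c2.toList (PySem.List.pyRange 0 (c1.toList.length : Int) 2) []

-- ===== PORT B =====
-- hand port of int(s, 2) on a digit list: exact on the all-'0'/'1' strings Pre_ admits
-- (none where int() would raise there, i.e. only on the empty string; other ValueErrors
-- of int(_, 2) lie outside Pre_ and are also mapped to none)
def pvParseBin? (l : List Char) : Option Nat :=
  if l = [] then none
  else l.foldlM (fun a c => if c = '0' then some (2*a)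
                            else if c = '1' then some (2*a+1) else none) 0

def cube_intersection_alt (c1 : String) (c2 : String) : Option String :=
  let l1 := c1.toList
  let l2 := c2.toList
  let m : Nat := min l1.length l2.length                  -- m = min(len(c1), len(c2))
  if m = 0 then some ""                                   -- if m == 0: return ""
  else
    match pvParseBin? (l1.take m), pvParseBin? (l2.take m) with   -- int(c1[:m], 2), int(c2[:m], 2)
    | some a, some b =>
      let r : Nat := a &&& b                              -- r = int(..) & int(..)
      if (PySem.List.pyRange 0 ((m : Int) - 1) 2).any     -- for i in range(0, m - 1, 2):
          (fun i => ((r >>> ((m : Int) - 2 - i).toNat) &&& 3) == 0)  -- if (r >> (m-2-i)) & 3 == 0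
      then none
      else some (String.ofList (PySem.Chars.zfill (PySem.Int.toBinChars (r : Int)) (m : Int)))
                                                          -- format(r, 'b').zfill(m)
    | _, _ => none                                        -- int() raised ValueError: outside Pre_

-- ===== PRECONDITION & SPEC =====
-- Pre_ restricts to the function's natural cube domain: the overlapping prefixes of c1 and c2
-- consist of '0'/'1' only (the docstring's cube fields). Outside it A raises ValueError, or still
-- returns on other digit overlaps (e.g. ('7','5') → '5') or returns None when an early '00' field
-- precedes a non-digit char (('00x','00y') → None), while B's base-2 parse raises ValueError there.
def Pre_cube_intersection (c1 : String) (c2 : String) : Prop :=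
  ((c1.toList.take (min c1.toList.length c2.toList.length)).all (fun c => c == '0' || c == '1')) = true ∧
  ((c2.toList.take (min c1.toList.length c2.toList.length)).all (fun c => c == '0' || c == '1')) = true
instance (c1 : String) (c2 : String) : Decidable (Pre_cube_intersection c1 c2) := by
  unfold Pre_cube_intersection; infer_instance

def pvWitness_cube_intersection : String × String := ("1011", "1101")

def Spec_cube_intersection (c1 : String) (c2 : String) (out : Option String) : Prop := out = cube_intersection_alt c1 c2
instance (c1 : String) (c2 : String) (out : Option String) : Decidable (Spec_cube_intersection c1 c2 out) := by unfold Spec_cube_intersection; infer_instance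

-- ===== CLAIM (what is proved, stated in full; the proofs are below) =====
def Claim_equal_cube_intersection : Prop := ∀ (c1 : String) (c2 : String), Dom_cube_intersection c1 c2 → Pre_cube_intersection c1 c2 → Spec_cube_intersection c1 c2 (cube_intersection c1 c2)

-- ===== LEMMAS AND PROOFS =====

-- ---- shared values: the AND of two digit chars and the AND string over the overlap ----
def dAnd (a b : Char) : Char := Char.ofNat (48 + ((a.toNat - 48) &&& (b.toNat - 48)))
def andL (l1 l2 : List Char) : List Char := (l1.zip l2).map (fun p => dAnd p.1 p.2)

def bitc (c : Char) : Nat := if c = '1' then 1 else 0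
def binVal (l : List Char) : Nat := l.foldl (fun a c => 2*a + bitc c) 0

-- ---- A-side lemmas (characterize pvLoopA) ----
theorem digit_mem (c : Char) (h : c.isDigit = true) :
    c ∈ ['0','1','2','3','4','5','6','7','8','9'] := by
  simp only [Char.isDigit, Bool.and_eq_true, decide_eq_true_eq] at h
  have h1 : 48 ≤ c.toNat := h.1
  have h2 : c.toNat ≤ 57 := h.2
  have := Char.ofNat_toNat c
  interval_cases hn : c.toNat <;> rw [← this] <;> decide

theorem digit_step (a b : Char) (ha : a.isDigit = true) (hb : b.isDigit = true) :
    (do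
      let v1 ← PySem.Int.ofChars? [a]
      let v2 ← PySem.Int.ofChars? [b]
      pure (PySem.Int.toChars (PySem.Int.band v1 v2)) : Option (List Char)) = some [dAnd a b] := by
  have ha' := digit_mem a ha
  have hb' := digit_mem b hb
  fin_cases ha' <;> fin_cases hb' <;> decide

theorem zip_drop {α β : Type} (l1 : List α) (l2 : List β) (n : Nat) :
    (l1.zip l2).drop n = (l1.drop n).zip (l2.drop n) := by
  induction l1 generalizing l2 n with
  | nil => simp
  | cons a t ih =>
    cases l2 with
    | nil => simp
    | cons b t2 =>
      cases n with
      | zero => simp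
      | succ m => simpa using ih t2 m

theorem zip_take {α β : Type} (l1 : List α) (l2 : List β) (n : Nat) :
    (l1.zip l2).take n = (l1.take n).zip (l2.take n) := by
  induction l1 generalizing l2 n with
  | nil => simp
  | cons a t ih =>
    cases l2 with
    | nil => simp
    | cons b t2 =>
      cases n with
      | zero => simp
      | succ m => simpa using ih t2 m

theorem mapM_some_of_forall {α β : Type} (f : α → Option β) (g : α → β) (l : List α)
    (h : ∀ x ∈ l, f x = some (g x)) : l.mapM f = some (l.map g) := by
  induction l with
  | nil => rfl
  | cons a t ih =>
    rw [List.mapM_cons, h a (by simp), ih (fun x hx => h x (by simp [hx]))]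
    rfl

theorem flatten_singleton_map {α β : Type} (l : List α) (f : α → β) :
    (l.map (fun a => [f a])).flatten = l.map f := by
  induction l with
  | nil => rfl
  | cons a t ih => simp [ih]

theorem interChunk_eq (p1 p2 : List Char)
    (h : ∀ p ∈ p1.zip p2, p.1.isDigit = true ∧ p.2.isDigit = true) :
    pvInterChunk p1 p2 = some ((p1.zip p2).map (fun p => dAnd p.1 p.2)) := by
  unfold pvInterChunk
  rw [mapM_some_of_forall _ (fun bp => [dAnd bp.1 bp.2]) _
      (fun bp hbp => digit_step bp.1 bp.2 (h bp hbp).1 (h bp hbp).2)]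
  simp [flatten_singleton_map]

theorem interChunk_slice (l1 l2 : List Char)
    (hd : ∀ p ∈ l1.zip l2, p.1.isDigit = true ∧ p.2.isDigit = true) (j : Nat) :
    pvInterChunk (PySem.List.slice l1 (some (j : Int)) (some ((j : Int) + 2)))
                 (PySem.List.slice l2 (some (j : Int)) (some ((j : Int) + 2)))
      = some (PySem.List.slice (andL l1 l2) (some (j : Int)) (some ((j : Int) + 2))) := by
  have h2 : ((j : Int) + 2) = ((j : Int) + ((2 : Nat) : Int)) := by push_cast; ring
  rw [h2, PySem.List.slice_natCast_add, PySem.List.slice_natCast_add, PySem.List.slice_natCast_add]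
  rw [interChunk_eq _ _ (fun p hp => hd p
        (List.mem_of_mem_drop (List.mem_of_mem_take (by
          rwa [← zip_take, ← zip_drop] at hp))))]
  rw [← zip_take, ← zip_drop, andL, List.map_take, List.map_drop]

theorem loopA_char (l1 l2 : List Char)
    (hd : ∀ p ∈ l1.zip l2, p.1.isDigit = true ∧ p.2.isDigit = true) :
    ∀ (idxs : List Int), (∀ i ∈ idxs, 0 ≤ i) → ∀ (acc : List Char),
    pvLoopA l1 l2 idxs acc =
      if idxs.any (fun i => PySem.List.slice (andL l1 l2) (some i) (some (i+2)) == ['0','0'])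
      then none
      else some (String.ofList (acc ++
        (idxs.map (fun i => PySem.List.slice (andL l1 l2) (some i) (some (i+2)))).flatten)) := by
  intro idxs
  induction idxs with
  | nil => intro _ acc; simp [pvLoopA]
  | cons i rest ih =>
    intro hnn acc
    obtain ⟨j, rfl⟩ := Int.eq_ofNat_of_zero_le (hnn i (by simp))
    rw [pvLoopA, interChunk_slice l1 l2 hd j]
    by_cases hz : PySem.List.slice (andL l1 l2) (some (j : Int)) (some ((j : Int) + 2)) = ['0','0']
    · simp [hz]
    · simp only [List.any_cons]
      rw [ih (fun x hx => hnn x (by simp [hx])) ]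
      simp [hz]

theorem flatten_chunks {α : Type} : ∀ (cnt : Nat) (s : List α), s.length ≤ 2*cnt →
    ((List.range cnt).map (fun k => (s.drop (2*k)).take 2)).flatten = s := by
  intro cnt
  induction cnt with
  | zero => intro s hs; simp at hs ⊢; omega
  | succ n ih =>
    intro s hs
    rw [List.range_succ_eq_map, List.map_cons, List.map_map]
    have hcomp : ((fun k => (s.drop (2*k)).take 2) ∘ Nat.succ)
        = (fun k => ((s.drop 2).drop (2*k)).take 2) := by
      funext k
      simp [List.drop_drop]
      congr 2
      omega
    rw [hcomp, List.flatten_cons, ih (s.drop 2) (by simp; omega)]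
    simp

theorem length_andL (l1 l2 : List Char) : (andL l1 l2).length = min l1.length l2.length := by
  simp [andL]

-- ---- binVal basics ----
theorem binVal_foldl_from (l : List Char) (a : Nat) :
    l.foldl (fun a c => 2*a + bitc c) a = a * 2 ^ l.length + binVal l := by
  induction l generalizing a with
  | nil => simp [binVal]
  | cons c t ih =>
    simp only [List.foldl_cons, List.length_cons]
    rw [ih (2*a + bitc c)]
    have h2 : binVal (c :: t) = (2*0 + bitc c) * 2 ^ t.length + binVal t := by
      calc binVal (c :: t) = List.foldl (fun a c => 2*a + bitc c) (2*0 + bitc c) t := rfl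
        _ = (2*0 + bitc c) * 2 ^ t.length + binVal t := ih (2*0 + bitc c)
    rw [h2]
    ring

theorem binVal_cons (c : Char) (l : List Char) :
    binVal (c :: l) = bitc c * 2 ^ l.length + binVal l := by
  calc binVal (c :: l) = List.foldl (fun a c => 2*a + bitc c) (2*0 + bitc c) l := rfl
    _ = (2*0 + bitc c) * 2 ^ l.length + binVal l := binVal_foldl_from l (2*0 + bitc c)
    _ = bitc c * 2 ^ l.length + binVal l := by ring

theorem binVal_append (s t : List Char) :
    binVal (s ++ t) = binVal s * 2 ^ t.length + binVal t := by
  induction s with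
  | nil => simp [binVal]
  | cons c t ih =>
    simp only [List.cons_append, binVal_cons, List.length_append]
    rw [ih, pow_add]
    ring

theorem binVal_lt (l : List Char) : binVal l < 2 ^ l.length := by
  induction l with
  | nil => simp [binVal]
  | cons c t ih =>
    rw [binVal_cons]
    have : bitc c ≤ 1 := by unfold bitc; split <;> omega
    have h2 : (2:Nat) ^ (c :: t).length = 2 * 2 ^ t.length := by
      simp [List.length_cons, pow_succ]; ring
    rw [h2]
    nlinarith

theorem binVal_replicate_zero (p : Nat) : binVal (List.replicate p '0') = 0 := by
  induction p with
  | zero => rfl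
  | succ n ih =>
    rw [List.replicate_succ, binVal_cons, ih]
    simp [bitc]

-- ---- the hand parser computes binVal on binary lists ----
theorem parse_eq (l : List Char) (hb : ∀ c ∈ l, c = '0' ∨ c = '1') (hne : l ≠ []) :
    pvParseBin? l = some (binVal l) := by
  unfold pvParseBin?
  rw [if_neg hne]
  have aux : ∀ (l : List Char), (∀ c ∈ l, c = '0' ∨ c = '1') → ∀ (a : Nat),
      List.foldlM (m := Option) (fun a c => if c = '0' then some (2*a)
          else if c = '1' then some (2*a+1) else none) a l
        = some (l.foldl (fun a c => 2*a + bitc c) a) := by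
    intro l hl
    induction l with
    | nil => intro a; rfl
    | cons c t ih =>
      intro a
      have ih' := ih (fun x hx => hl x (by simp [hx]))
      rcases hl c (by simp) with rfl | rfl
      · simp only [List.foldlM_cons, List.foldl_cons, reduceIte]
        show List.foldlM (fun a c => if c = '0' then some (2*a)
            else if c = '1' then some (2*a+1) else none) (2*a) t = _
        rw [ih']
        simp [bitc]
      · simp only [List.foldlM_cons, List.foldl_cons, reduceIte]
        show List.foldlM (fun a c => if c = '0' then some (2*a)
            else if c = '1' then some (2*a+1) else none) (2*a+1) t = _
        rw [ih']
        simp [bitc]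
  rw [aux l hb 0]
  rfl

-- ---- big-int AND = char-wise AND string ----
theorem land_two (a c b1 b2 : Nat) (h1 : b1 < 2) (h2 : b2 < 2) :
    (2*a + b1) &&& (2*c + b2) = 2*(a &&& c) + b1 * b2 := by
  apply Nat.eq_of_testBit_eq
  intro i
  have hp : b1*b2 < 2 := by nlinarith
  cases i with
  | zero =>
    have e1 : (2*a + b1) % 2 = b1 := by omega
    have e2 : (2*c + b2) % 2 = b2 := by omega
    have e3 : (2*(a &&& c) + b1*b2) % 2 = b1*b2 := by omega
    rw [Nat.testBit_land]
    simp only [Nat.testBit_zero, e1, e2, e3]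
    interval_cases b1 <;> interval_cases b2 <;> decide
  | succ i =>
    have e1 : (2*a + b1) / 2 = a := by omega
    have e2 : (2*c + b2) / 2 = c := by omega
    have e3 : (2*(a &&& c) + b1*b2) / 2 = a &&& c := by omega
    rw [Nat.testBit_land, Nat.testBit_add_one, Nat.testBit_add_one, Nat.testBit_add_one,
      e1, e2, e3, Nat.testBit_land]

theorem land_binVal (s t : List Char) (hlen : s.length = t.length)
    (hs : ∀ c ∈ s, c = '0' ∨ c = '1') (ht : ∀ c ∈ t, c = '0' ∨ c = '1') :
    binVal s &&& binVal t = binVal (andL s t) := by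
  induction s using List.reverseRecOn generalizing t with
  | nil =>
    cases t with
    | nil => simp [andL, binVal]
    | cons d t' => simp at hlen
  | append_singleton s a ih =>
    rcases t.eq_nil_or_concat with rfl | ⟨t', d, rfl⟩
    · simp at hlen
    · rw [List.concat_eq_append] at *
      have hl : s.length = t'.length := by
        simp at hlen; omega
      have hz : (s ++ [a]).zip (t' ++ [d]) = s.zip t' ++ [(a, d)] := by
        rw [List.zip_append hl]; rfl
      have hand : andL (s ++ [a]) (t' ++ [d]) = andL s t' ++ [dAnd a d] := by
        rw [andL, hz, List.map_append]; rfl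
      have hcs : ∀ x (y : Char), binVal (x ++ [y]) = 2 * binVal x + bitc y := by
        intro x y
        rw [binVal_append]
        simp [binVal]
        ring
      rw [hcs, hcs, hand, hcs]
      have hba : bitc a < 2 := by unfold bitc; split <;> omega
      have hbd : bitc d < 2 := by unfold bitc; split <;> omega
      rw [land_two _ _ _ _ hba hbd]
      rw [ih t' hl (fun c hc => hs c (by simp [hc])) (fun c hc => ht c (by simp [hc]))]
      have haa := hs a (by simp)
      have hdd := ht d (by simp)
      rcases haa with rfl | rfl <;> rcases hdd with rfl | rfl <;> rfl


theorem bin_andL (s t : List Char)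
    (hs : ∀ c ∈ s, c = '0' ∨ c = '1') (ht : ∀ c ∈ t, c = '0' ∨ c = '1') :
    ∀ c ∈ andL s t, c = '0' ∨ c = '1' := by
  intro c hc
  simp only [andL, List.mem_map] at hc
  obtain ⟨⟨x, y⟩, hmem, rfl⟩ := hc
  obtain ⟨hx, hy⟩ := List.of_mem_zip hmem
  rcases hs x hx with rfl | rfl <;> rcases ht y hy with rfl | rfl <;> simp [dAnd]


-- ---- format(r,'b') : toBinChars computes the MSB binary digits ----
def binOf : Nat → List Char
  | 0 => []
  | n+1 => binOf ((n+1)/2) ++ [if (n+1) % 2 = 1 then '1' else '0']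
decreasing_by exact Nat.div_lt_self (Nat.succ_pos n) (by omega)

def padBin (n : Nat) : List Char := if n = 0 then ['0'] else binOf n

theorem toDigitsCore_eq : ∀ (f n : Nat) (l : List Char), n < f →
    Nat.toDigitsCore 2 f n l = padBin n ++ l := by
  intro f
  induction f with
  | zero => intro n l h; omega
  | succ f ih =>
    intro n l h
    simp only [Nat.toDigitsCore]
    by_cases h0 : n / 2 = 0
    · rw [if_pos h0]
      have : n = 0 ∨ n = 1 := by omega
      rcases this with rfl | rfl <;> simp [padBin, binOf, Nat.digitChar]
    · rw [if_neg h0]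
      have hn2 : 2 ≤ n := by omega
      rw [ih (n / 2) _ (by omega)]
      have hpb : padBin n = binOf (n / 2) ++ [if n % 2 = 1 then '1' else '0'] := by
        unfold padBin
        rw [if_neg (by omega)]
        rcases n with _ | m
        · omega
        · rw [binOf]
      have hd : (n % 2).digitChar = (if n % 2 = 1 then '1' else '0') := by
        rcases Nat.mod_two_eq_zero_or_one n with h2 | h2 <;> rw [h2] <;> rfl
      rw [hpb, hd]
      have : padBin (n / 2) = binOf (n / 2) := by
        unfold padBin; rw [if_neg h0]
      rw [this, List.append_assoc]
      rfl


theorem toBinChars_nat (n : Nat) : PySem.Int.toBinChars (n : Int) = padBin n := by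
  unfold PySem.Int.toBinChars
  rw [if_neg (by omega)]
  show Nat.toDigits 2 (n : Int).toNat = _
  rw [Int.toNat_natCast]
  unfold Nat.toDigits
  rw [toDigitsCore_eq (n+1) n [] (by omega), List.append_nil]


theorem binVal_binOf (n : Nat) : binVal (binOf n) = n := by
  induction n using Nat.strong_induction_on with
  | _ n ih =>
    rcases n with _ | m
    · simp [binOf, binVal]
    · rw [binOf, binVal_append, ih ((m+1)/2) (by omega)]
      have hb : binVal [if (m+1) % 2 = 1 then '1' else '0'] = (m+1) % 2 := by
        rcases Nat.mod_two_eq_zero_or_one (m+1) with h2 | h2 <;> rw [h2] <;> rfl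
      rw [hb]
      simp only [List.length_singleton, pow_one]
      omega


theorem binVal_padBin (n : Nat) : binVal (padBin n) = n := by
  unfold padBin
  split
  · subst n; rfl
  · exact binVal_binOf n


theorem bin_padBin (n : Nat) : ∀ c ∈ padBin n, c = '0' ∨ c = '1' := by
  have hbo : ∀ n, ∀ c ∈ binOf n, c = '0' ∨ c = '1' := by
    intro n
    induction n using Nat.strong_induction_on with
    | _ n ih =>
      rcases n with _ | m
      · intro c hc; simp [binOf] at hc
      · intro c hc
        rw [binOf] at hc
        rcases List.mem_append.1 hc with h | h
        · exact ih ((m+1)/2) (by omega) c h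
        · simp at h
          subst h
          split <;> simp
  unfold padBin
  split
  · intro c hc; simp at hc; simp [hc]
  · exact hbo n


theorem padBin_ne_nil (n : Nat) : padBin n ≠ [] := by
  unfold padBin
  split
  · simp
  · rcases n with _ | m
    · omega
    · rw [binOf]; simp


theorem length_padBin_le (n m : Nat) (hm1 : 1 ≤ m) (h : n < 2 ^ m) : (padBin n).length ≤ m := by
  induction n using Nat.strong_induction_on generalizing m with
  | _ n ih =>
    rcases n with _ | k
    · simpa [padBin] using hm1
    · unfold padBin
      rw [if_neg (by omega), binOf]
      by_cases hq : (k+1) / 2 = 0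
      · rw [hq]
        simp [binOf]
        omega
      · have hk2 : 2 ≤ k + 1 := by omega
        have hm2 : 2 ≤ m := by
          by_contra hcon
          have hm1' : m = 1 := by omega
          rw [hm1'] at h
          omega
        have hpow : (2:Nat) ^ m = 2 * 2 ^ (m-1) := by
          rcases m with _ | m'
          · omega
          · rw [pow_succ]
            simp
            ring
        have hlt : (k+1)/2 < 2 ^ (m-1) := by omega
        have := ih ((k+1)/2) (by omega) (m-1) (by omega) hlt
        rw [show padBin ((k+1)/2) = binOf ((k+1)/2) from by unfold padBin; rw [if_neg hq]] at this
        simp only [List.length_append, List.length_singleton]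
        omega


theorem binary_inj : ∀ (s t : List Char), s.length = t.length →
    (∀ c ∈ s, c = '0' ∨ c = '1') → (∀ c ∈ t, c = '0' ∨ c = '1') →
    binVal s = binVal t → s = t := by
  intro s
  induction s with
  | nil =>
    intro t hlen _ _ _
    cases t with
    | nil => rfl
    | cons d t' => simp at hlen
  | cons c s' ih =>
    intro t hlen hs ht hv
    cases t with
    | nil => simp at hlen
    | cons d t' =>
      have hl : s'.length = t'.length := by simpa using hlen
      rw [binVal_cons, binVal_cons, hl] at hv
      have h1 : binVal s' < 2 ^ t'.length := hl ▸ binVal_lt s'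
      have h2 : binVal t' < 2 ^ t'.length := binVal_lt t'
      have hbc : bitc c ≤ 1 := by unfold bitc; split <;> omega
      have hbd : bitc d ≤ 1 := by unfold bitc; split <;> omega
      have key : ∀ (b1 b2 v1 v2 E : Nat), b1 ≤ 1 → b2 ≤ 1 → v1 < E → v2 < E →
          b1*E + v1 = b2*E + v2 → b1 = b2 ∧ v1 = v2 := by
        intro b1 b2 v1 v2 E hb1 hb2 hv1 hv2 heq
        interval_cases b1 <;> interval_cases b2 <;> omega
      have hb : bitc c = bitc d ∧ binVal s' = binVal t' :=
        key _ _ _ _ _ hbc hbd h1 h2 hv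
      have hcd : c = d := by
        rcases hs c (by simp) with rfl | rfl <;> rcases ht d (by simp) with rfl | rfl <;>
          first | rfl | (exfalso; simp [bitc] at hb)
      rw [hcd, ih t' hl (fun x hx => hs x (by simp [hx])) (fun x hx => ht x (by simp [hx])) hb.2]


theorem zfill_eq (s : List Char) (hs : ∀ c ∈ s, c = '0' ∨ c = '1') (hne : s ≠ []) :
    PySem.Chars.zfill (padBin (binVal s)) (s.length : Int) = s := by
  have hm : 1 ≤ s.length := by
    cases s with
    | nil => exact absurd rfl hne
    | cons a t => simp
  have hv : binVal s < 2 ^ s.length := binVal_lt s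
  have hlen : (padBin (binVal s)).length ≤ s.length := length_padBin_le _ _ hm hv
  unfold PySem.Chars.zfill
  by_cases hc : (s.length : Int) ≤ ((padBin (binVal s)).length : Int)
  · rw [if_pos hc]
    exact binary_inj _ s (by omega) (bin_padBin _) hs (binVal_padBin _)
  · rw [if_neg hc]
    obtain ⟨c, rest, he⟩ := List.exists_cons_of_ne_nil (padBin_ne_nil (binVal s))
    rw [he]
    have hcbin : c = '0' ∨ c = '1' := bin_padBin _ c (he ▸ List.mem_cons_self)
    have hcn : (c = '+' ∨ c = '-') = False := by
      rcases hcbin with rfl | rfl <;> simp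
    simp only [hcn, if_false]
    rw [← he]
    apply binary_inj
    · simp only [List.length_append, List.length_replicate]
      omega
    · intro x hx
      rcases List.mem_append.1 hx with h | h
      · left; exact List.eq_of_mem_replicate h
      · exact bin_padBin _ x h
    · exact hs
    · rw [binVal_append, binVal_replicate_zero, binVal_padBin]
      simp


-- ---- the two '00'-field tests agree ----
def zeroField (s : List Char) (k : Nat) : Prop :=
  s[2*k]? = some '0' ∧ s[2*k+1]? = some '0'

theorem take_two_eq (x : List Char) :
    x.take 2 = ['0','0'] ↔ x[0]? = some '0' ∧ x[1]? = some '0' := by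
  rcases x with _ | ⟨a, _ | ⟨b, t⟩⟩ <;> simp


theorem shift_mask (s : List Char) (k : Nat) (h : 2*k+2 ≤ s.length) :
    (binVal s >>> (s.length - 2 - 2*k)) &&& 3 = binVal ((s.drop (2*k)).take 2) := by
  have hsplit : s = s.take (2*k+2) ++ s.drop (2*k+2) := (List.take_append_drop _ s).symm
  have hlen1 : (s.take (2*k+2)).length = 2*k+2 := by simp; omega
  have hlen2 : (s.drop (2*k+2)).length = s.length - 2 - 2*k := by simp; omega
  have hE : (0:Nat) < 2 ^ (s.length - 2 - 2*k) := Nat.two_pow_pos _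
  have hB := binVal_lt (s.drop (2*k+2))
  rw [hlen2] at hB
  have hval : binVal s = binVal (s.take (2*k+2)) * 2 ^ (s.length - 2 - 2*k)
      + binVal (s.drop (2*k+2)) := by
    conv_lhs => rw [hsplit]
    rw [binVal_append, hlen2]
  rw [hval, Nat.shiftRight_eq_div_pow]
  have hdiv : (binVal (s.take (2*k+2)) * 2 ^ (s.length - 2 - 2*k)
      + binVal (s.drop (2*k+2))) / 2 ^ (s.length - 2 - 2*k) = binVal (s.take (2*k+2)) := by
    rw [mul_comm, Nat.mul_add_div hE, Nat.div_eq_of_lt hB]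
    omega
  rw [hdiv]
  have htk : s.take (2*k+2) = s.take (2*k) ++ (s.drop (2*k)).take 2 := by
    rw [← List.take_add]
  have hlen3 : ((s.drop (2*k)).take 2).length = 2 := by simp; omega
  have hB2 := binVal_lt ((s.drop (2*k)).take 2)
  rw [hlen3] at hB2
  rw [show (3:Nat) = 2 ^ 2 - 1 from rfl, Nat.and_two_pow_sub_one_eq_mod]
  rw [htk, binVal_append, hlen3]
  omega


theorem binVal_two_zero (s : List Char) (k : Nat) (h : 2*k+2 ≤ s.length)
    (hs : ∀ c ∈ s, c = '0' ∨ c = '1') :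
    binVal ((s.drop (2*k)).take 2) = 0 ↔ zeroField s k := by
  have h1 : 2*k < s.length := by omega
  have h2 : 2*k+1 < s.length := by omega
  have e : (s.drop (2*k)).take 2 = [s[2*k]'h1, s[2*k+1]'h2] := by
    apply List.ext_getElem
    · simp; omega
    · intro i hi1 hi2
      simp only [List.length_take, List.length_drop] at hi1
      have : i < 2 := by omega
      interval_cases i <;> simp
  rw [e]
  unfold zeroField
  rw [List.getElem?_eq_getElem h1, List.getElem?_eq_getElem h2]
  have hv : binVal [s[2*k]'h1, s[2*k+1]'h2]
      = bitc (s[2*k]'h1) * 2 + bitc (s[2*k+1]'h2) := by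
    rw [binVal_cons, binVal_cons]
    simp [binVal]
  rw [hv]
  have ha := hs _ (List.getElem_mem h1)
  have hb := hs _ (List.getElem_mem h2)
  constructor
  · intro h0
    have hba : bitc (s[2*k]'h1) = 0 ∧ bitc (s[2*k+1]'h2) = 0 := by omega
    refine ⟨?_, ?_⟩
    · rcases ha with he' | he' <;> rw [he'] at hba ⊢ <;> simp [bitc] at hba ⊢
    · rcases hb with he' | he' <;> rw [he'] at hba ⊢ <;> simp [bitc] at hba ⊢
  · rintro ⟨ea, eb⟩
    rw [Option.some.inj ea, Option.some.inj eb]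
    rfl

theorem anyA_iff (s : List Char) (L : Nat) (hL : s.length ≤ L) :
    ((PySem.List.pyRange 0 (L : Int) 2).any
        (fun i => PySem.List.slice s (some i) (some (i+2)) == ['0','0'])) = true
      ↔ ∃ k : Nat, zeroField s k := by
  rw [List.any_eq_true]
  constructor
  · rintro ⟨i, hi, hp⟩
    obtain ⟨h0, hiL, hdvd⟩ := (PySem.List.mem_pyRange_iff_of_pos (by norm_num) i).1 hi
    obtain ⟨j, hj⟩ := hdvd
    have hj0 : 0 ≤ j := by omega
    obtain ⟨k, rfl⟩ := Int.eq_ofNat_of_zero_le hj0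
    have hik : i = ((2*k : Nat) : Int) := by push_cast; omega
    rw [hik, show ((2*k:Nat):Int) + 2 = ((2*k:Nat):Int) + ((2:Nat):Int) from by push_cast; ring,
      PySem.List.slice_natCast_add, beq_iff_eq, take_two_eq] at hp
    have h1' := hp.1
    have h2' := hp.2
    rw [List.getElem?_drop] at h1' h2'
    refine ⟨k, ?_, ?_⟩
    · simpa using h1'
    · simpa using h2' 
  · rintro ⟨k, hk1, hk2⟩
    have hlt : 2*k+1 < s.length := by
      obtain ⟨hb, -⟩ := List.getElem?_eq_some_iff.1 hk2
      exact hb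
    refine ⟨((2*k:Nat):Int), ?_, ?_⟩
    · rw [PySem.List.mem_pyRange_iff_of_pos (by norm_num)]
      refine ⟨by positivity, by push_cast; omega, ⟨(k:Int), by push_cast; ring⟩⟩
    · rw [show ((2*k:Nat):Int) + 2 = ((2*k:Nat):Int) + ((2:Nat):Int) from by push_cast; ring,
        PySem.List.slice_natCast_add, beq_iff_eq, take_two_eq]
      constructor
      · rw [List.getElem?_drop]; simpa using hk1
      · rw [List.getElem?_drop]; simpa using hk2


theorem anyB_iff (s : List Char) (hs : ∀ c ∈ s, c = '0' ∨ c = '1') :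
    ((PySem.List.pyRange 0 ((s.length : Int) - 1) 2).any
        (fun i => ((binVal s >>> ((s.length : Int) - 2 - i).toNat) &&& 3) == 0)) = true
      ↔ ∃ k : Nat, zeroField s k := by
  rw [List.any_eq_true]
  constructor
  · rintro ⟨i, hi, hp⟩
    obtain ⟨h0, hiL, hdvd⟩ := (PySem.List.mem_pyRange_iff_of_pos (by norm_num) i).1 hi
    obtain ⟨j, hj⟩ := hdvd
    have hj0 : 0 ≤ j := by omega
    obtain ⟨k, rfl⟩ := Int.eq_ofNat_of_zero_le hj0
    have hik : i = ((2*k : Nat) : Int) := by push_cast; omega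
    have hkm : 2*k+2 ≤ s.length := by omega
    have htn : (((s.length : Int) - 2 - ((2*k:Nat):Int)).toNat) = s.length - 2 - 2*k := by
      push_cast; omega
    rw [hik, htn, beq_iff_eq, shift_mask s k hkm, binVal_two_zero s k hkm hs] at hp
    exact ⟨k, hp⟩
  · rintro ⟨k, hz⟩
    have hlt : 2*k+1 < s.length := by
      obtain ⟨hb, -⟩ := List.getElem?_eq_some_iff.1 hz.2
      exact hb
    have hkm : 2*k+2 ≤ s.length := by omega
    have htn : (((s.length : Int) - 2 - ((2*k:Nat):Int)).toNat) = s.length - 2 - 2*k := by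
      push_cast; omega
    refine ⟨((2*k:Nat):Int), ?_, ?_⟩
    · rw [PySem.List.mem_pyRange_iff_of_pos (by norm_num)]
      refine ⟨by positivity, by push_cast; omega, ⟨(k:Int), by push_cast; ring⟩⟩
    · rw [htn, beq_iff_eq, shift_mask s k hkm, binVal_two_zero s k hkm hs]
      exact hz


-- ===== VERDICT (by name: the statement is the Claim_ definition above) =====
theorem cube_intersection_spec : Claim_equal_cube_intersection := by
  intro c1 c2 _ hpre
  unfold Pre_cube_intersection at hpre
  obtain ⟨hq1, hq2⟩ := hpre
  rw [List.all_eq_true] at hq1 hq2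
  have hp1 : ∀ c ∈ c1.toList.take (min c1.toList.length c2.toList.length), c = '0' ∨ c = '1' := by
    intro c hc
    have := hq1 c hc
    rcases Bool.or_eq_true_iff.1 this with h | h
    · exact Or.inl (by exact_mod_cast beq_iff_eq.1 h)
    · exact Or.inr (by exact_mod_cast beq_iff_eq.1 h)
  have hp2 : ∀ c ∈ c2.toList.take (min c1.toList.length c2.toList.length), c = '0' ∨ c = '1' := by
    intro c hc
    have := hq2 c hc
    rcases Bool.or_eq_true_iff.1 this with h | h
    · exact Or.inl (by exact_mod_cast beq_iff_eq.1 h)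
    · exact Or.inr (by exact_mod_cast beq_iff_eq.1 h)
  unfold Spec_cube_intersection cube_intersection cube_intersection_alt
  dsimp only
  set l1 := c1.toList with hl1
  set l2 := c2.toList with hl2
  set m := min l1.length l2.length with hm
  have hzipT : l1.zip l2 = (l1.take m).zip (l2.take m) := by
    calc l1.zip l2 = (l1.zip l2).take m := (List.take_of_length_le (by simp [hm])).symm
      _ = (l1.take m).zip (l2.take m) := zip_take _ _ _
  have hd : ∀ p ∈ l1.zip l2, p.1.isDigit = true ∧ p.2.isDigit = true := by
    intro p hp
    rw [hzipT] at hp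
    obtain ⟨hx, hy⟩ := List.of_mem_zip hp
    constructor
    · rcases hp1 p.1 hx with h | h <;> rw [h] <;> decide
    · rcases hp2 p.2 hy with h | h <;> rw [h] <;> decide
  have hsEq : andL l1 l2 = andL (l1.take m) (l2.take m) := by
    rw [andL, andL, hzipT]
  have hsbin : ∀ c ∈ andL l1 l2, c = '0' ∨ c = '1' := by
    rw [hsEq]; exact bin_andL _ _ hp1 hp2
  have hslen : (andL l1 l2).length = m := length_andL l1 l2
  have hnn : ∀ i ∈ PySem.List.pyRange 0 (l1.length : Int) 2, 0 ≤ i := fun i hi =>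
    ((PySem.List.mem_pyRange_iff_of_pos (by norm_num) i).1 hi).1
  rw [loopA_char l1 l2 hd _ hnn []]
  by_cases hm0 : m = 0
  · rw [if_pos hm0]
    have hs0 : andL l1 l2 = [] := List.eq_nil_of_length_eq_zero (by rw [hslen, hm0])
    have hslice0 : ∀ i : Int, PySem.List.slice (andL l1 l2) (some i) (some (i+2)) = [] := by
      intro i
      rw [hs0]
      apply List.eq_nil_of_length_eq_zero
      rw [PySem.List.length_slice]
      have a1 := PySem.List.clampIdx_le (n := ([] : List Char).length) (i := i+2)
      have a2 := PySem.List.clampIdx_le (n := ([] : List Char).length) (i := i)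
      simp only [List.length_nil] at a1 a2 ⊢
      omega
    simp only [hslice0]
    simp
  · rw [if_neg hm0]
    have hm1 : 1 ≤ m := by omega
    have hml1 : m ≤ l1.length := by rw [hm]; exact Nat.min_le_left _ _
    have hml2 : m ≤ l2.length := by rw [hm]; exact Nat.min_le_right _ _
    have hlen1 : (l1.take m).length = m := by simp; omega
    have hlen2 : (l2.take m).length = m := by simp; omega
    have hne1 : l1.take m ≠ [] := by
      intro hcon; rw [hcon] at hlen1; simp at hlen1; omega
    have hne2 : l2.take m ≠ [] := by
      intro hcon; rw [hcon] at hlen2; simp at hlen2; omega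
    rw [parse_eq _ hp1 hne1, parse_eq _ hp2 hne2]
    dsimp only
    have hr : binVal (l1.take m) &&& binVal (l2.take m) = binVal (andL l1 l2) := by
      rw [hsEq]; exact land_binVal _ _ (by omega) hp1 hp2
    rw [hr]
    set s := andL l1 l2 with hsdef
    have hsne : s ≠ [] := by
      intro hcon; rw [hcon] at hslen; simp at hslen; omega
    have hms : m = s.length := hslen.symm
    by_cases hex : ∃ k, zeroField s k
    · have hA := (anyA_iff s l1.length (by omega)).2 hex
      have hB := (anyB_iff s hsbin).2 hex
      rw [hms]
      rw [if_pos hA, if_pos hB]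
    · have hA : ¬(((PySem.List.pyRange 0 (l1.length : Int) 2).any
          (fun i => PySem.List.slice s (some i) (some (i+2)) == ['0','0'])) = true) :=
        fun h => hex ((anyA_iff s l1.length (by omega)).1 h)
      have hB : ¬(((PySem.List.pyRange 0 ((s.length : Int) - 1) 2).any
          (fun i => ((binVal s >>> ((s.length : Int) - 2 - i).toNat) &&& 3) == 0)) = true) :=
        fun h => hex ((anyB_iff s hsbin).1 h)
      rw [hms]
      rw [if_neg hA, if_neg hB]
      rw [toBinChars_nat, zfill_eq s hsbin hsne]
      congr 1
      rw [List.nil_append]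
      congr 1
      -- flatten of the 2-char slices over range(0, len(l1), 2) is the AND string s
      rw [PySem.List.pyRange_of_pos 0 (l1.length : Int) (by norm_num)]
      set n := l1.length with hn
      have hpos : 0 < n := by omega
      have hlt : (0:Int) < (n:Int) := by exact_mod_cast hpos
      rw [if_pos hlt]
      set cnt := (((n:Int) - 0 + 2 - 1) / 2).toNat with hcnt
      have hcnt' : n ≤ 2 * cnt := by
        have : cnt = (((n:Int) + 1) / 2).toNat := by rw [hcnt]; ring_nf
        omega
      rw [List.map_map]
      have hcomp : ((fun i => PySem.List.slice s (some i) (some (i+2))) ∘ (fun k : Nat => (0:Int) + 2 * (k:Int)))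
          = (fun k : Nat => (s.drop (2*k)).take 2) := by
        funext k
        have e1 : ((0:Int) + 2 * (k:Int)) = ((2*k : Nat) : Int) := by push_cast; ring
        simp only [Function.comp, e1]
        rw [show ((2*k : Nat) : Int) + 2 = ((2*k : Nat) : Int) + ((2:Nat) : Int) by push_cast; ring]
        rw [PySem.List.slice_natCast_add]
      rw [hcomp, flatten_chunks cnt s (by omega)]
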